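-- pv_equiv track=rewrite | github.com/norla111236/CPUscheduling_SRPTusingB-B | sumOfC/hw4_bfsSRPT.py | sumOfC
-- ===== SOURCE A (Python) =====
-- def sumOfC(job):
--     currTime = job[0][1] + job[0][2]
--     sumOfC=currTime
--     for i in range(1, len(job)):
--         if(job[i][2] <= currTime):
--             currTime += job[i][1]
--         else:
--             currTime = job[i][2]
--             currTime += job[i][1]
--         sumOfC+=currTime
--     return sumOfC
-- ===== SOURCE B (Python) =====
-- def sumOfC(job):
--     # closed form: completion of job i = max over k<=i of (release_k + processing time of k..i),
--     # computed with a prefix-sum table instead of a running-time recurrence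
--     prefix = [0]
--     for j in job:
--         prefix.append(prefix[-1] + j[1])
--     return sum(
--         max(job[k][2] + prefix[i + 1] - prefix[k] for k in range(i + 1))
--         for i in range(len(job))
--     )
-- ===== Notes on version B (the rewrite author's own statement) =====
-- stated objective: alternative
-- what changed: Replaces A's running-clock DP recurrence (branch on release vs current time, accumulate) by the closed form C_i = max over k<=i of (release_k + processing of jobs k..i), evaluated with a prefix-sum table and a per-job max over all start points.
import Mathlib
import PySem

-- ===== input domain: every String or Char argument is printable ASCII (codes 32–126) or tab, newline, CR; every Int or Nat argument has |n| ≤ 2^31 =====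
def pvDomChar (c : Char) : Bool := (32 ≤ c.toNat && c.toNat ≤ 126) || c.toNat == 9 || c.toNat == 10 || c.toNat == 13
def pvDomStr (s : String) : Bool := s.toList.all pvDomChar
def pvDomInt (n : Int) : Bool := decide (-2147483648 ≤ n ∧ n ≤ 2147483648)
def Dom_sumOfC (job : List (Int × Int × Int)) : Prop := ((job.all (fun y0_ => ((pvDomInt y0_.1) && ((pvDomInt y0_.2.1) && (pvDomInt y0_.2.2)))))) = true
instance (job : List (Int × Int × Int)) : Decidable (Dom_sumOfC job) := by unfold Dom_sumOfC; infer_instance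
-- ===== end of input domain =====

-- B replaces A's running-clock recurrence by the closed form C_i = max_{k≤i}(release_k + processing of k..i)
-- evaluated with a prefix-sum table (alternative algorithm; return value only, no mutation).

-- ===== PORT A =====
def sumOfC (job : List (Int × Int × Int)) : Int :=
  let j0 := PySem.List.pyGetD job 0 (0, 0, 0)
  let st := (PySem.List.pyRange 1 (job.length : Int) 1).foldl
    (fun (st : Int × Int) i =>
      let j := PySem.List.pyGetD job i (0, 0, 0)
      let currTime := if j.2.2 ≤ st.1 then st.1 + j.2.1 else j.2.2 + j.2.1
      (currTime, st.2 + currTime))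
    (j0.2.1 + j0.2.2, j0.2.1 + j0.2.2)
  st.2

-- ===== PORT B =====
-- python's max over a nonempty generator, transliterated as a fold
def pvMaxList (xs : List Int) : Int :=
  match xs with
  | [] => 0
  | c :: cs => cs.foldl max c

def sumOfC_alt (job : List (Int × Int × Int)) : Int :=
  let pre := job.foldl (fun ps j => ps ++ [PySem.List.pyGetD ps (-1) 0 + j.2.1]) [(0 : Int)]
  ((List.range job.length).map (fun (i : Nat) =>
    pvMaxList ((List.range (i + 1)).map (fun (k : Nat) =>
      (PySem.List.pyGetD job (k : Int) (0, 0, 0)).2.2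
        + PySem.List.pyGetD pre ((i : Int) + 1) 0 - PySem.List.pyGetD pre (k : Int) 0)))).sum

-- ===== PRECONDITION & SPEC =====
-- Pre_ excludes the empty list, on which A raises IndexError (job[0]).
def Pre_sumOfC (job : List (Int × Int × Int)) : Prop := job ≠ []
instance (job : List (Int × Int × Int)) : Decidable (Pre_sumOfC job) := by unfold Pre_sumOfC; infer_instance
def pvWitness_sumOfC : (List (Int × Int × Int)) := [(1, 2, 3)]
def Spec_sumOfC (job : List (Int × Int × Int)) (out : Int) : Prop := out = sumOfC_alt job
instance (job : List (Int × Int × Int)) (out : Int) : Decidable (Spec_sumOfC job out) := by unfold Spec_sumOfC; infer_instance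

-- ===== CLAIM =====
def Claim_equal_sumOfC : Prop := ∀ (job : List (Int × Int × Int)), Dom_sumOfC job → Pre_sumOfC job → Spec_sumOfC job (sumOfC job)

-- ===== LEMMAS AND PROOFS =====

-- completion-time list of A's recurrence, starting clock t
def pvCT (t : Int) : List (Int × Int × Int) → List Int
  | [] => []
  | j :: l => (max t j.2.2 + j.2.1) :: pvCT (max t j.2.2 + j.2.1) l

-- prefix-sum tail produced by B's first loop, running total a
def pvPre (a : Int) : List (Int × Int × Int) → List Int
  | [] => []
  | j :: l => (a + j.2.1) :: pvPre (a + j.2.1) l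

-- prefix sum of processing times
def pvPS (l : List (Int × Int × Int)) (k : Nat) : Int := ((l.map (fun j => j.2.1)).take k).sum

lemma pvCT_length (t : Int) (l : List (Int × Int × Int)) : (pvCT t l).length = l.length := by
  induction l generalizing t with
  | nil => rfl
  | cons j l ih => simp [pvCT, ih]

-- A's fold totals the completion-time list
lemma pv_A_fold (l : List (Int × Int × Int)) : ∀ (t s : Int),
    (l.foldl
      (fun (st : Int × Int) j =>
        let currTime := if j.2.2 ≤ st.1 then st.1 + j.2.1 else j.2.2 + j.2.1
        (currTime, st.2 + currTime)) (t, s)).2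
    = s + (pvCT t l).sum := by
  induction l with
  | nil => intro t s; simp [pvCT]
  | cons j l ih =>
      intro t s
      simp only [List.foldl_cons, pvCT, List.sum_cons]
      have h : (if j.2.2 ≤ t then t + j.2.1 else j.2.2 + j.2.1) = max t j.2.2 + j.2.1 := by
        split_ifs with h <;> omega
      rw [h, ih]; ring

-- B's first fold builds the prefix-sum list
lemma pv_B_prefix (l : List (Int × Int × Int)) : ∀ (ps : List Int) (a : Int),
    PySem.List.pyGetD ps (-1) 0 = a →
    l.foldl (fun ps j => ps ++ [PySem.List.pyGetD ps (-1) 0 + j.2.1]) ps = ps ++ pvPre a l := by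
  induction l with
  | nil => intro ps a _; simp [pvPre]
  | cons j l ih =>
      intro ps a h
      simp only [List.foldl_cons, h, pvPre]
      rw [ih (ps ++ [a + j.2.1]) (a + j.2.1) (PySem.List.pyGetD_neg_one_append_singleton ps _ 0)]
      simp

-- entries of the prefix-sum list are prefix sums
lemma pv_pre_getD (l : List (Int × Int × Int)) : ∀ (a : Int) (k : Nat), k ≤ l.length →
    (a :: pvPre a l).getD k 0 = a + pvPS l k := by
  induction l with
  | nil =>
      intro a k hk
      have hk0 : k = 0 := by simpa using hk
      subst hk0
      simp [pvPS]
  | cons j l ih =>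
      intro a k hk
      cases k with
      | zero => simp [pvPS]
      | succ k =>
          have := ih (a + j.2.1) k (by simpa using hk)
          simpa [pvPre, pvPS, add_assoc] using this
  -- note: pvPS (j::l) (k+1) = j.2.1 + pvPS l k

lemma pvPS_succ (l : List (Int × Int × Int)) (m : Nat) (hm : m < l.length) :
    pvPS l (m + 1) = pvPS l m + (l.getD m (0,0,0)).2.1 := by
  unfold pvPS
  rw [List.sum_take_succ _ m (by simpa using hm)]
  simp [List.getD_eq_getElem?_getD, List.getElem?_eq_getElem hm]

-- the completion-time list satisfies A's recurrence entrywise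
lemma pv_CT_step (l : List (Int × Int × Int)) : ∀ (t : Int) (i : Nat), i < l.length →
    (t :: pvCT t l).getD (i + 1) 0
      = max ((t :: pvCT t l).getD i 0) (l.getD i (0,0,0)).2.2 + (l.getD i (0,0,0)).2.1 := by
  induction l with
  | nil => intro t i hi; simp at hi
  | cons j l ih =>
      intro t i hi
      cases i with
      | zero => simp [pvCT]
      | succ i =>
          have := ih (max t j.2.2 + j.2.1) i (by simpa using hi)
          simpa [pvCT] using this

lemma pvMaxList_append_singleton (xs : List Int) (x : Int) (h : xs ≠ []) :
    pvMaxList (xs ++ [x]) = max (pvMaxList xs) x := by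
  obtain ⟨c, cs, rfl⟩ := List.exists_cons_of_ne_nil h
  simp [pvMaxList, List.foldl_append]

lemma pv_foldl_max_add (l : List Int) : ∀ (a c : Int),
    (l.map (fun x => x + c)).foldl max (a + c) = l.foldl max a + c := by
  induction l with
  | nil => intro a c; simp
  | cons b l ih =>
      intro a c
      simp only [List.map_cons, List.foldl_cons]
      rw [show max (a + c) (b + c) = max a b + c by omega, ih]

lemma pvMaxList_map_add (xs : List Int) (c : Int) (h : xs ≠ []) :
    pvMaxList (xs.map (fun x => x + c)) = pvMaxList xs + c := by
  obtain ⟨a, l, rfl⟩ := List.exists_cons_of_ne_nil h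
  simp only [pvMaxList, List.map_cons]
  exact pv_foldl_max_add l a c

-- the closed-form max equals the corresponding completion-time entry
lemma pv_max_eq_CT (j0 : Int × Int × Int) (rest : List (Int × Int × Int)) :
    ∀ (i : Nat), i < (j0 :: rest).length →
    pvMaxList ((List.range (i + 1)).map (fun k =>
        ((j0 :: rest).getD k (0,0,0)).2.2 + pvPS (j0 :: rest) (i + 1) - pvPS (j0 :: rest) k))
      = ((j0.2.1 + j0.2.2) :: pvCT (j0.2.1 + j0.2.2) rest).getD i 0 := by
  intro i
  induction i with
  | zero =>
      intro _
      have h1 : pvPS (j0 :: rest) 1 = j0.2.1 := by simp [pvPS]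
      have h0 : pvPS (j0 :: rest) 0 = 0 := by simp [pvPS]
      simp [pvMaxList, List.range_succ, h1, h0]
      omega
  | succ i ih =>
      intro hi
      have hi' : i < (j0 :: rest).length := by omega
      have hrest : i < rest.length := by simpa using hi
      have hne : (List.range (i + 1)).map (fun k =>
          ((j0 :: rest).getD k (0,0,0)).2.2 + pvPS (j0 :: rest) (i + 1) - pvPS (j0 :: rest) k) ≠ [] := by
        simp
      have hstep := pvPS_succ (j0 :: rest) (i + 1) hi
      have hget : ((j0 :: rest).getD (i + 1) (0,0,0)) = rest.getD i (0,0,0) := by simp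
      -- split the range at its last element
      rw [List.range_succ, List.map_append]
      simp only [List.map_cons, List.map_nil]
      rw [pvMaxList_append_singleton _ _ (by simp)]
      -- the first part is the previous candidate list shifted by p_{i+1}
      have hshift : (List.range (i + 1)).map (fun k =>
            ((j0 :: rest).getD k (0,0,0)).2.2 + pvPS (j0 :: rest) (i + 1 + 1) - pvPS (j0 :: rest) k)
          = ((List.range (i + 1)).map (fun k =>
            ((j0 :: rest).getD k (0,0,0)).2.2 + pvPS (j0 :: rest) (i + 1) - pvPS (j0 :: rest) k)).map
              (fun x => x + (rest.getD i (0,0,0)).2.1) := by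
        rw [List.map_map]
        apply List.map_congr_left
        intro k hk
        simp only [Function.comp]
        rw [hstep, hget]
        ring
      rw [hshift, pvMaxList_map_add _ _ hne, ih hi']
      have hlast : ((j0 :: rest).getD (i + 1) (0,0,0)).2.2 + pvPS (j0 :: rest) (i + 1 + 1) - pvPS (j0 :: rest) (i + 1)
          = (rest.getD i (0,0,0)).2.2 + (rest.getD i (0,0,0)).2.1 := by
        rw [hstep, hget]; ring
      rw [hlast, pv_CT_step rest _ i hrest]
      omega

lemma pv_map_getD_range (l : List Int) :
    (List.range l.length).map (fun i => l.getD i 0) = l := by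
  apply List.ext_getElem (by simp)
  intro n h1 h2
  simp [List.getD_eq_getElem?_getD, List.getElem?_eq_getElem h2]

-- ===== VERDICT =====
theorem sumOfC_spec : Claim_equal_sumOfC := by
  unfold Claim_equal_sumOfC
  intro job _ hpre
  unfold Spec_sumOfC sumOfC sumOfC_alt
  obtain ⟨j0, rest, rfl⟩ := List.exists_cons_of_ne_nil hpre
  simp only []
  -- A side: fold over indices 1..n-1 = fold over rest
  rw [PySem.List.foldl_pyRange_pyGetD' (j0 :: rest) (0,0,0)
        (fun (st : Int × Int) j =>
          let currTime := if j.2.2 ≤ st.1 then st.1 + j.2.1 else j.2.2 + j.2.1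
          (currTime, st.2 + currTime)) _ (by omega)]
  rw [show Int.toNat 1 = 1 from rfl, List.drop_one]
  simp only [PySem.List.pyGetD_zero_cons, List.tail_cons]
  rw [pv_A_fold]
  -- B side: prefix list, then each max is a completion time
  rw [pv_B_prefix (j0 :: rest) [(0 : Int)] 0 (by decide)]
  simp only [List.singleton_append]
  have hent : ∀ i ∈ List.range (j0 :: rest).length,
      pvMaxList ((List.range (i + 1)).map (fun (k : Nat) =>
        (PySem.List.pyGetD (j0 :: rest) (k : Int) (0, 0, 0)).2.2
          + PySem.List.pyGetD ((0 : Int) :: pvPre 0 (j0 :: rest)) ((i : Int) + 1) 0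
          - PySem.List.pyGetD ((0 : Int) :: pvPre 0 (j0 :: rest)) (k : Int) 0))
      = ((j0.2.1 + j0.2.2) :: pvCT (j0.2.1 + j0.2.2) rest).getD i 0 := by
    intro i hi
    rw [List.mem_range] at hi
    have hmap : ∀ (k : Nat), k ∈ List.range (i + 1) →
        (PySem.List.pyGetD (j0 :: rest) (k : Int) (0, 0, 0)).2.2
          + PySem.List.pyGetD ((0 : Int) :: pvPre 0 (j0 :: rest)) ((i : Int) + 1) 0
          - PySem.List.pyGetD ((0 : Int) :: pvPre 0 (j0 :: rest)) (k : Int) 0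
        = ((j0 :: rest).getD k (0,0,0)).2.2 + pvPS (j0 :: rest) (i + 1) - pvPS (j0 :: rest) k := by
      intro k hk
      rw [List.mem_range] at hk
      have hcast : ((i : Int) + 1) = ((i + 1 : Nat) : Int) := by push_cast; ring
      rw [hcast, PySem.List.pyGetD_natCast, PySem.List.pyGetD_natCast, PySem.List.pyGetD_natCast]
      rw [show ((0 : Int) :: pvPre 0 (j0 :: rest)).getD (i + 1) 0 = 0 + pvPS (j0 :: rest) (i + 1) from
            pv_pre_getD (j0 :: rest) 0 (i + 1) (by simpa using hi),
          show ((0 : Int) :: pvPre 0 (j0 :: rest)).getD k 0 = 0 + pvPS (j0 :: rest) k from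
            pv_pre_getD (j0 :: rest) 0 k (by omega)]
      ring
    rw [List.map_congr_left hmap]
    exact pv_max_eq_CT j0 rest i hi
  rw [List.map_congr_left hent]
  rw [show (j0 :: rest).length = ((j0.2.1 + j0.2.2) :: pvCT (j0.2.1 + j0.2.2) rest).length by
        simp [pvCT_length]]
  rw [pv_map_getD_range]
  simp
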